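-- pv_equiv track=rewrite | github.com/jeter1011/MET | met_functions.py | unassigned_int
-- ===== SOURCE A (Python) =====
-- def unassigned_int(float_pair):
--     """
--     converts a 2 unit list into a 32bit binary string and returns an unassigned integer
--     representation of a floating point
--
--     :param float_pair: list[2]
--     :return: unassigned integer
--     """
--
--     bin0 = bin(float_pair[0] % (1<<16))[2:]
--     bin1 = bin(float_pair[1] % (1<<16))[2:]
--
--     while len(bin0) < 16:
--         bin0 = '0' + bin0
--
--     while len(bin1) < 15:
--         bin1 = '0' + bin1
--
--     return int(bin1 + bin0, 2)
-- ===== SOURCE B (Python) =====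
-- def unassigned_int(float_pair):
--     hi = float_pair[1] % (1 << 16)
--     lo = float_pair[0] % (1 << 16)
--     return hi * 65536 + lo
-- ===== Notes on version B (the rewrite author's own statement) =====
-- stated objective: simpler
-- what changed: Replaced building two zero-padded binary strings with while-loops and re-parsing their concatenation via int(s,2) by the direct arithmetic closed form (fp[1] % 2**16) * 65536 + (fp[0] % 2**16).
import Mathlib
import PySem

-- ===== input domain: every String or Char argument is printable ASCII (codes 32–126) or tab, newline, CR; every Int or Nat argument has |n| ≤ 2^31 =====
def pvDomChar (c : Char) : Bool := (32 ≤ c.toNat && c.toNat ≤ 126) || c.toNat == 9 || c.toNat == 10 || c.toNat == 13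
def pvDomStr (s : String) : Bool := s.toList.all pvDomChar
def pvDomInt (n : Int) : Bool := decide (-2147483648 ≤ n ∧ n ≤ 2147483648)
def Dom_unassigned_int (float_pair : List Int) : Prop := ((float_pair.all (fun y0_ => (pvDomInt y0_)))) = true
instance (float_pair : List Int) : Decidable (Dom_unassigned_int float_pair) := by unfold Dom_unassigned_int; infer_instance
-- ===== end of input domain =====

-- B replaces A's binary-string building, padding loops and re-parsing by the closed
-- arithmetic form (fp[1] % 2^16) * 65536 + (fp[0] % 2^16)  (objective: simpler).

-- ===== PORT A =====
-- int(s, 2): hand-ported base-2 parse. Exact for the strings A actually builds here —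
-- nonempty strings of '0'/'1' characters (the output of bin(n % 2**16)[2:] padded with '0's);
-- on these it agrees with Python's int(s, 2).
def pvIntBase2 (cs : List Char) : Int :=
  cs.foldl (fun acc c => acc * 2 + (if c = '1' then 1 else 0)) 0

-- the 'while len(s) < t: s = '0' + s' padding loop
def pvPad (t : Nat) (s : List Char) : List Char :=
  if s.length < t then pvPad t ('0' :: s) else s
  termination_by t - s.length

def unassigned_int (float_pair : List Int) : Int :=
  -- bin(float_pair[i] % (1<<16))[2:]  (index i: Pre_ guarantees it is in range)
  let bin0 := PySem.List.slice (PySem.Int.toBinChars0b (PySem.Int.mod (PySem.List.pyGetD float_pair 0 0) 65536)) (some 2) none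
  let bin1 := PySem.List.slice (PySem.Int.toBinChars0b (PySem.Int.mod (PySem.List.pyGetD float_pair 1 0) 65536)) (some 2) none
  let bin0 := pvPad 16 bin0
  let bin1 := pvPad 15 bin1
  pvIntBase2 (bin1 ++ bin0)

-- ===== PORT B =====
def unassigned_int_alt (float_pair : List Int) : Int :=
  let hi := PySem.Int.mod (PySem.List.pyGetD float_pair 1 0) 65536
  let lo := PySem.Int.mod (PySem.List.pyGetD float_pair 0 0) 65536
  hi * 65536 + lo

-- ===== PRECONDITION & SPEC =====
-- A raises IndexError when the list has fewer than two elements.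
def Pre_unassigned_int (float_pair : List Int) : Prop := 2 ≤ float_pair.length
instance (float_pair : List Int) : Decidable (Pre_unassigned_int float_pair) := by unfold Pre_unassigned_int; infer_instance
def pvWitness_unassigned_int : List Int := [1, 2]

def Spec_unassigned_int (float_pair : List Int) (out : Int) : Prop := out = unassigned_int_alt float_pair
instance (float_pair : List Int) (out : Int) : Decidable (Spec_unassigned_int float_pair out) := by unfold Spec_unassigned_int; infer_instance

-- ===== CLAIM (what is proved, stated in full; the proofs are below) =====
def Claim_equal_unassigned_int : Prop := ∀ (float_pair : List Int), Dom_unassigned_int float_pair → Pre_unassigned_int float_pair → Spec_unassigned_int float_pair (unassigned_int float_pair)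

-- ===== LEMMAS AND PROOFS =====

-- folding the parse from an arbitrary accumulator
theorem pvIntBase2_foldl (cs : List Char) (a : Int) :
    cs.foldl (fun acc c => acc * 2 + (if c = '1' then 1 else 0)) a
      = a * 2 ^ cs.length + pvIntBase2 cs := by
  induction cs generalizing a with
  | nil => simp [pvIntBase2]
  | cons c cs ih =>
    simp only [List.foldl_cons, pvIntBase2, List.length_cons]
    rw [ih, ih (0 * 2 + _)]
    ring

theorem pvIntBase2_append (l r : List Char) :
    pvIntBase2 (l ++ r) = pvIntBase2 l * 2 ^ r.length + pvIntBase2 r := by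
  unfold pvIntBase2
  rw [List.foldl_append, pvIntBase2_foldl]
  rfl

theorem pvIntBase2_cons_zero (s : List Char) : pvIntBase2 ('0' :: s) = pvIntBase2 s := by
  simp [pvIntBase2]

theorem pvIntBase2_pvPad (t : Nat) (s : List Char) : pvIntBase2 (pvPad t s) = pvIntBase2 s := by
  fun_induction pvPad t s with
  | case1 s h ih => rw [ih, pvIntBase2_cons_zero]
  | case2 => rfl

theorem pvPad_length (t : Nat) (s : List Char) (h : s.length ≤ t) : (pvPad t s).length = t := by
  fun_induction pvPad t s with
  | case1 s h' ih => exact ih (by simpa using h')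
  | case2 s h' => omega

-- the parse inverts Nat.toDigits 2
theorem pvIntBase2_toDigits (m : Nat) : pvIntBase2 (Nat.toDigits 2 m) = (m : Int) := by
  induction m using Nat.strong_induction_on with
  | _ m ih =>
    rcases Nat.lt_or_ge m 2 with hm | hm
    · interval_cases m <;> decide
    · rw [Nat.toDigits_of_base_le (by norm_num) hm, pvIntBase2_append,
        ih (m / 2) (Nat.div_lt_self (by omega) (by norm_num))]
      have h2 : m % 2 = 0 ∨ m % 2 = 1 := by omega
      rcases h2 with h | h <;> simp [h, pvIntBase2, Nat.digitChar] <;> omega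

-- bin(x)[2:] for 0 ≤ x is the plain binary-digit string
theorem slice_toBinChars0b (x : Int) (hx : 0 ≤ x) :
    PySem.List.slice (PySem.Int.toBinChars0b x) (some 2) none = Nat.toDigits 2 x.toNat := by
  rw [show (2 : Int) = ((2 : Nat) : Int) from rfl, PySem.List.slice_from_natCast]
  simp [PySem.Int.toBinChars0b, not_lt.mpr hx]

theorem toDigits_len_le (m : Nat) (h : m < 65536) : (Nat.toDigits 2 m).length ≤ 16 :=
  (Nat.length_toDigits_le_iff (by norm_num) (by norm_num)).mpr (by norm_num [h])

-- ===== VERDICT (by name: the statement is the Claim_ definition above) =====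
theorem unassigned_int_spec : Claim_equal_unassigned_int := by
  intro fp _ _
  show unassigned_int fp = unassigned_int_alt fp
  unfold unassigned_int unassigned_int_alt
  set x0 := PySem.Int.mod (PySem.List.pyGetD fp 0 0) 65536 with hx0
  set x1 := PySem.Int.mod (PySem.List.pyGetD fp 1 0) 65536 with hx1
  have h0n : 0 ≤ x0 := PySem.Int.mod_nonneg _ (by norm_num)
  have h0l : x0 < 65536 := PySem.Int.mod_lt _ (by norm_num)
  have h1n : 0 ≤ x1 := PySem.Int.mod_nonneg _ (by norm_num)
  have h1l : x1 < 65536 := PySem.Int.mod_lt _ (by norm_num)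
  simp only [slice_toBinChars0b x0 h0n, slice_toBinChars0b x1 h1n]
  have hlen0 : (pvPad 16 (Nat.toDigits 2 x0.toNat)).length = 16 :=
    pvPad_length _ _ (toDigits_len_le _ (by omega))
  rw [pvIntBase2_append, hlen0, pvIntBase2_pvPad, pvIntBase2_pvPad,
    pvIntBase2_toDigits, pvIntBase2_toDigits]
  have e0 : ((x0.toNat : Int)) = x0 := Int.toNat_of_nonneg h0n
  have e1 : ((x1.toNat : Int)) = x1 := Int.toNat_of_nonneg h1n
  rw [e0, e1]
  norm_num
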